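-- pv_equiv track=rewrite | github.com/Suchitra1912/coding-challenges | coding_challenge_39/solution.py | square_pattern
-- ===== SOURCE A (Python) =====
-- def square_pattern(n):
--     if n <= 0:
--         return "Error"
--
--     num = 1
--     result = []
--
--     for row in range(1, n + 1):
--         current = []
--         for _ in range(row):
--             square = num * num
--             # Alternate sign based on square index
--             if num % 2 == 0:
--                 square = -square
--             current.append(str(square))
--             num += 1
--         result.append(" ".join(current))
--
--     return result
-- ===== SOURCE B (Python) =====
-- def square_pattern(n):
--     if n <= 0:
--         return "Error"
--     total = n * (n + 1) // 2
--     flat = [str(i * i if i % 2 else -(i * i)) for i in range(1, total + 1)]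
--     result = []
--     offset = 0
--     for row in range(1, n + 1):
--         result.append(" ".join(flat[offset:offset + row]))
--         offset += row
--     return result
-- ===== Notes on version B (the rewrite author's own statement) =====
-- stated objective: alternative
-- what changed: Replaces the nested counter loop (running num with an inner per-row append loop) by two separate passes: first generate the full flat list of n*(n+1)//2 signed-square strings by a closed-form sign rule on the index, then cut it into triangular rows with slices of growing length.
-- outside the precondition, e.g. on square_pattern(0): A returns 'Error', B returns 'Error'; on square_pattern(-2): A returns 'Error', B returns 'Error'
import Mathlib
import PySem

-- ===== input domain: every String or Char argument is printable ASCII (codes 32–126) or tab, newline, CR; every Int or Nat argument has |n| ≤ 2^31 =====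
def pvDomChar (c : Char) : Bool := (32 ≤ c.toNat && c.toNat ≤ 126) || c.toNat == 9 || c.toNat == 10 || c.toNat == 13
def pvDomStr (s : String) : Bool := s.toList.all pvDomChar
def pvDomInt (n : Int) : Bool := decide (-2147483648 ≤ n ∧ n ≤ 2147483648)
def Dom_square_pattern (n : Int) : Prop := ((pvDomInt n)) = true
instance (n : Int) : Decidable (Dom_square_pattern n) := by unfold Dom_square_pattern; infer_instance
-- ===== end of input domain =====

-- B replaces A's nested counter loop by two passes: generate the flat list of signed-square
-- strings, then slice it into triangular rows; same cost, alternative decomposition.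


-- ===== PORT A =====
-- Literal port of A's nested loop (running counter num; inner loop appends row elements).
def square_pattern (n : Int) : List String :=
  ((PySem.List.pyRange 1 (n + 1) 1).foldl
    (fun (st : Int × List String) _row =>
      let inner := (PySem.List.pyRange 0 _row 1).foldl
        (fun (st2 : Int × List String) _ =>
          let square := st2.1 * st2.1
          let square := if PySem.Int.mod st2.1 2 = 0 then -square else square
          (st2.1 + 1, st2.2 ++ [PySem.Int.toStr square]))
        (st.1, [])
      (inner.1, st.2 ++ [PySem.Str.join " " inner.2]))
    (1, [])).2

-- ===== PORT B =====
-- Literal port of B: flat list of signed-square strings, then slices of growing length.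
def square_pattern_alt (n : Int) : List String :=
  let total := PySem.Int.floordiv (n * (n + 1)) 2
  let flat := (PySem.List.pyRange 1 (total + 1) 1).map
    (fun i => PySem.Int.toStr (if PySem.Int.mod i 2 ≠ 0 then i * i else -(i * i)))
  ((PySem.List.pyRange 1 (n + 1) 1).foldl
    (fun (st : Int × List String) row =>
      (st.1 + row,
       st.2 ++ [PySem.Str.join " " (PySem.List.slice flat (some st.1) (some (st.1 + row)))]))
    (0, [])).2

-- ===== PRECONDITION & SPEC =====
-- Pre_ excludes n ≤ 0, where Python A returns the string "Error" instead of a list of strings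
-- (not a value of the declared return type); B does the same there.
def Pre_square_pattern (n : Int) : Prop := 0 < n
instance (n : Int) : Decidable (Pre_square_pattern n) := by unfold Pre_square_pattern; infer_instance
def pvWitness_square_pattern : Int := (3)

def Spec_square_pattern (n : Int) (out : List String) : Prop := out = square_pattern_alt n
instance (n : Int) (out : List String) : Decidable (Spec_square_pattern n out) := by unfold Spec_square_pattern; infer_instance

-- ===== CLAIM (what is proved, stated in full; the proofs are below) =====
def Claim_equal_square_pattern : Prop := ∀ (n : Int), Dom_square_pattern n → Pre_square_pattern n → Spec_square_pattern n (square_pattern n)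

-- ===== LEMMAS AND PROOFS =====

-- the string both programs emit for counter value i
def pvCell (i : Int) : String :=
  PySem.Int.toStr (if PySem.Int.mod i 2 = 0 then -(i * i) else i * i)

-- triangular numbers as Int
def pvTri : Nat → Int
  | 0 => 0
  | m + 1 => pvTri m + (m + 1)

-- canonical result for n = m rows
def pvCanon : Nat → List String
  | 0 => []
  | m + 1 => pvCanon m ++
      [PySem.Str.join " " ((PySem.List.pyRange (pvTri m + 1) (pvTri m + 1 + (m + 1)) 1).map pvCell)]

lemma pvTri_nonneg (m : Nat) : 0 ≤ pvTri m := by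
  induction m with
  | zero => simp [pvTri]
  | succ k ih => simp only [pvTri]; positivity

lemma pvTri_mono {a b : Nat} (h : a ≤ b) : pvTri a ≤ pvTri b := by
  induction b with
  | zero => simp [Nat.le_zero.mp h]
  | succ k ih =>
    rcases Nat.lt_succ_iff_lt_or_eq.mp (Nat.lt_succ_of_le h) with h' | h'
    · have h2 := ih (Nat.lt_succ_iff.mp h')
      simp only [pvTri]
      have : (0 : Int) ≤ (k : Int) + 1 := by positivity
      omega
    · simp [h']

lemma pvTri_double (m : Nat) : 2 * pvTri m = (m : Int) * ((m : Int) + 1) := by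
  induction m with
  | zero => simp [pvTri]
  | succ k ih => simp only [pvTri]; push_cast; nlinarith [ih]

-- A's inner loop over any list: appends pvCell num, …, pvCell (num + len - 1)
lemma pvInnerA (l : List Int) : ∀ (num : Int) (cur : List String),
    l.foldl
      (fun (st2 : Int × List String) _ =>
        let square := st2.1 * st2.1
        let square := if PySem.Int.mod st2.1 2 = 0 then -square else square
        (st2.1 + 1, st2.2 ++ [PySem.Int.toStr square]))
      (num, cur)
    = (num + l.length, cur ++ (PySem.List.pyRange num (num + l.length) 1).map pvCell) := by
  induction l with
  | nil => intro num cur; simp [PySem.List.pyRange_one_eq_nil]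
  | cons x xs ih =>
    intro num cur
    simp only [List.foldl_cons, ih, List.length_cons]
    rw [show num + ((xs.length + 1 : Nat) : Int) = num + 1 + (xs.length : Int) by push_cast; ring]
    have hcons : PySem.List.pyRange num (num + 1 + (xs.length : Int)) 1
        = num :: PySem.List.pyRange (num + 1) (num + 1 + (xs.length : Int)) 1 :=
      PySem.List.pyRange_one_cons (by omega)
    rw [hcons, List.map_cons]
    simp only [pvCell, List.append_assoc, List.singleton_append]

-- A's outer fold over the first m rows
lemma pvOuterA (m : Nat) :
    (PySem.List.pyRange 1 ((m : Int) + 1) 1).foldl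
      (fun (st : Int × List String) _row =>
        let inner := (PySem.List.pyRange 0 _row 1).foldl
          (fun (st2 : Int × List String) _ =>
            let square := st2.1 * st2.1
            let square := if PySem.Int.mod st2.1 2 = 0 then -square else square
            (st2.1 + 1, st2.2 ++ [PySem.Int.toStr square]))
          (st.1, [])
        (inner.1, st.2 ++ [PySem.Str.join " " inner.2]))
      (1, [])
    = (pvTri m + 1, pvCanon m) := by
  induction m with
  | zero => simp [PySem.List.pyRange_one_eq_nil, pvTri, pvCanon]
  | succ k ih =>
    push_cast
    have hsplit : PySem.List.pyRange 1 ((k : Int) + 1 + 1) 1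
        = PySem.List.pyRange 1 ((k : Int) + 1) 1 ++ [(k : Int) + 1] :=
      PySem.List.pyRange_one_succ_right (by omega)
    rw [hsplit, List.foldl_append, ih]
    simp only [List.foldl_cons, List.foldl_nil]
    rw [pvInnerA]
    simp only [PySem.List.length_pyRange_one, Int.sub_zero, Prod.mk.injEq]
    rw [show ((((k : Int) + 1).toNat : Nat) : Int) = (k : Int) + 1 by omega]
    constructor
    · simp only [pvTri]; ring
    · simp only [pvCanon, List.nil_append]

-- cutting out the middle of a concatenation by a slice of matching bounds
lemma pvSliceMid {α : Type} (l1 l2 l3 : List α) (j r : Nat)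
    (h1 : l1.length = j) (h2 : l2.length = r) :
    PySem.List.slice (l1 ++ l2 ++ l3) (some (j : Int)) (some ((j : Int) + (r : Int))) = l2 := by
  rw [PySem.List.slice_natCast_add, List.append_assoc, ← h1, List.drop_left, ← h2, List.take_left]

-- the slice B takes for row k+1 (within a flat list of T ≥ tri (k+1) cells) is row k+1's cells
lemma pvSliceRow (T : Int) (k : Nat) (hT : pvTri (k + 1) ≤ T) :
    PySem.List.slice ((PySem.List.pyRange 1 (T + 1) 1).map pvCell)
      (some (pvTri k)) (some (pvTri k + ((k : Int) + 1)))
    = (PySem.List.pyRange (pvTri k + 1) (pvTri k + 1 + ((k : Int) + 1)) 1).map pvCell := by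
  have h0 : 0 ≤ pvTri k := pvTri_nonneg k
  have hk1 : pvTri (k + 1) = pvTri k + ((k : Int) + 1) := by simp [pvTri]
  rw [hk1] at hT
  rw [PySem.List.pyRange_one_append 1 (pvTri k + 1) (T + 1) (by omega) (by omega),
      PySem.List.pyRange_one_append (pvTri k + 1) (pvTri k + 1 + ((k : Int) + 1)) (T + 1)
        (by omega) (by omega),
      List.map_append, List.map_append, ← List.append_assoc]
  have hmid := pvSliceMid ((PySem.List.pyRange 1 (pvTri k + 1) 1).map pvCell)
      ((PySem.List.pyRange (pvTri k + 1) (pvTri k + 1 + ((k : Int) + 1)) 1).map pvCell)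
      ((PySem.List.pyRange (pvTri k + 1 + ((k : Int) + 1)) (T + 1) 1).map pvCell)
      (pvTri k).toNat (k + 1)
      (by simp only [List.length_map, PySem.List.length_pyRange_one]; omega)
      (by simp only [List.length_map, PySem.List.length_pyRange_one]; omega)
  rw [Int.toNat_of_nonneg h0] at hmid
  rw [show pvTri k + ((k : Int) + 1) = pvTri k + (((k + 1 : Nat) : Int)) by push_cast; ring, hmid]

lemma pvCellB (i : Int) :
    PySem.Int.toStr (if PySem.Int.mod i 2 ≠ 0 then i * i else -(i * i)) = pvCell i := by
  have h2 : PySem.Int.mod i 2 = i % 2 := PySem.Int.mod_eq_emod_of_pos (by omega)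
  unfold pvCell
  rw [h2]
  rcases Int.emod_two_eq i with h | h <;> simp [h]


-- B's fold over the first n rows (flat list long enough for n rows)
lemma pvOuterB (n : Nat) (T : Int) (hT : pvTri n ≤ T) :
    (PySem.List.pyRange 1 ((n : Int) + 1) 1).foldl
      (fun (st : Int × List String) row =>
        (st.1 + row,
         st.2 ++ [PySem.Str.join " "
           (PySem.List.slice ((PySem.List.pyRange 1 (T + 1) 1).map
              (fun i => PySem.Int.toStr (if PySem.Int.mod i 2 ≠ 0 then i * i else -(i * i))))
             (some st.1) (some (st.1 + row)))]))
      (0, [])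
    = (pvTri n, pvCanon n) := by
  rw [List.map_congr_left (fun x _ => pvCellB x)]
  induction n with
  | zero => simp [PySem.List.pyRange_one_eq_nil, pvTri, pvCanon]
  | succ k ih =>
    push_cast
    have hsplit : PySem.List.pyRange 1 ((k : Int) + 1 + 1) 1
        = PySem.List.pyRange 1 ((k : Int) + 1) 1 ++ [(k : Int) + 1] :=
      PySem.List.pyRange_one_succ_right (by omega)
    rw [hsplit, List.foldl_append,
        ih (le_trans (pvTri_mono (Nat.le_succ k)) hT)]
    simp only [List.foldl_cons, List.foldl_nil, Prod.mk.injEq]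
    rw [pvSliceRow T k hT]
    constructor
    · simp only [pvTri]
    · simp only [pvCanon]

lemma pvMain (m : Nat) :
    square_pattern (m : Int) = square_pattern_alt (m : Int) := by
  have hT : PySem.Int.floordiv ((m : Int) * ((m : Int) + 1)) 2 = pvTri m := by
    rw [PySem.Int.floordiv_eq_iff_of_pos (by omega)]
    constructor <;> nlinarith [pvTri_double m]
  unfold square_pattern square_pattern_alt
  simp only [hT]
  rw [pvOuterA m, pvOuterB m (pvTri m) le_rfl]

-- ===== VERDICT (by name: the statement is the Claim_ definition above) =====
theorem square_pattern_spec : Claim_equal_square_pattern := by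
  intro n _ hpre
  unfold Spec_square_pattern
  rw [show n = ((n.toNat : Nat) : Int) from (Int.toNat_of_nonneg (le_of_lt hpre)).symm]
  exact pvMain n.toNat
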